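-- pv_equiv track=rewrite | github.com/glowisn/algorithm | 백준/Silver/18111. 마인크래프트/마인크래프트.py | flattening
-- ===== SOURCE A (Python) =====
-- def flattening(field,inventory,h):
--     time = 0
--     blocks = inventory
--     for n in range(len(field)):
--         for m in range(len(field[n])):
--             f = field[n][m]
--             if f > h:
--                 time += 2 * (f-h)
--                 blocks += (f-h)
--             if f < h:
--                 time += (h-f)
--                 blocks -= (h-f)
--
--     return time if blocks >= 0 else -1
-- ===== SOURCE B (Python) =====
-- def flattening(field, inventory, h):
--     # one pass builds a height histogram plus total/cell counts;
--     # time comes from distinct heights x their multiplicities,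
--     # blocks in closed form: inventory + sum(heights) - h*cells
--     counts = {}
--     total = 0
--     cells = 0
--     for row in field:
--         for v in row:
--             counts[v] = counts.get(v, 0) + 1
--             total += v
--             cells += 1
--     time = 0
--     for v, c in counts.items():
--         if v > h:
--             time += 2 * (v - h) * c
--         elif v < h:
--             time += (h - v) * c
--     blocks = inventory + total - h * cells
--     return time if blocks >= 0 else -1
-- ===== Notes on version B (the rewrite author's own statement) =====
-- stated objective: alternative
-- what changed: B replaces the per-cell accumulation of time and blocks by a height histogram built in one pass: time is summed over distinct height values times their multiplicities, and blocks is computed in closed form as inventory + sum(heights) - h*cells.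
import Mathlib
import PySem

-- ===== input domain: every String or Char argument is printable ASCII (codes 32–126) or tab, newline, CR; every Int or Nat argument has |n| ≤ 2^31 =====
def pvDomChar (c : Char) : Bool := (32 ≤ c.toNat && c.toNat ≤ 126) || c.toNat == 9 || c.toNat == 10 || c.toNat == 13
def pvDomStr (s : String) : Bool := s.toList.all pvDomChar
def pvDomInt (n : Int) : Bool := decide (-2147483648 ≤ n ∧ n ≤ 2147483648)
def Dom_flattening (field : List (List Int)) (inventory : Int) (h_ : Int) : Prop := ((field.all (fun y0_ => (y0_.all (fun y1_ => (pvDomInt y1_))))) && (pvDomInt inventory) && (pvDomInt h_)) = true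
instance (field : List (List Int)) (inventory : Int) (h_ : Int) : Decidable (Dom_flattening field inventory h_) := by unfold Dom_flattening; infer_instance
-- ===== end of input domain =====

-- B replaces A's per-cell time/blocks accumulation with a height histogram (time from
-- distinct values x multiplicities, blocks in closed form); objective: alternative algorithm.

-- ===== PORT A =====
-- Port of A: nested index loops over range(len(...)), accumulating (time, blocks) per cell.
-- pyGetD with a default is exact here: every index produced by pyRange is in range.
-- the two 'if' blocks of A's loop body on the state (time, blocks)
def pvStepA (h_ : Int) (s : Int × Int) (f : Int) : Int × Int :=
  let s := if f > h_ then (s.1 + 2 * (f - h_), s.2 + (f - h_)) else s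
  if f < h_ then (s.1 + (h_ - f), s.2 - (h_ - f)) else s

def flattening (field : List (List Int)) (inventory : Int) (h_ : Int) : Int :=
  let s : Int × Int :=
    (PySem.List.pyRange 0 (field.length : Int) 1).foldl (fun s n =>
      let row := PySem.List.pyGetD field n []
      (PySem.List.pyRange 0 (row.length : Int) 1).foldl (fun s m =>
        pvStepA h_ s (PySem.List.pyGetD row m 0)) s) (0, inventory)
  if s.2 ≥ 0 then s.1 else -1

-- ===== PORT B =====
-- Port of B: one pass building (histogram dict, total, cells), then a loop over the
-- histogram's items for time, and blocks in closed form.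
def flattening_alt (field : List (List Int)) (inventory : Int) (h_ : Int) : Int :=
  let st : PySem.Dict Int Int × Int × Int :=
    field.foldl (fun st row =>
      row.foldl (fun st v =>
        (st.1.insert v (st.1.getD v 0 + 1), st.2.1 + v, st.2.2 + 1)) st)
      (PySem.Dict.empty, 0, 0)
  let time : Int :=
    st.1.items.foldl (fun t p =>
      if p.1 > h_ then t + 2 * (p.1 - h_) * p.2
      else if p.1 < h_ then t + (h_ - p.1) * p.2
      else t) 0
  let blocks := inventory + st.2.1 - h_ * st.2.2
  if blocks ≥ 0 then time else -1

-- ===== PRECONDITION & SPEC =====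
def Spec_flattening (field : List (List Int)) (inventory : Int) (h_ : Int) (out : Int) : Prop := out = flattening_alt field inventory h_
instance (field : List (List Int)) (inventory : Int) (h_ : Int) (out : Int) : Decidable (Spec_flattening field inventory h_ out) := by unfold Spec_flattening; infer_instance

-- ===== CLAIM (what is proved, stated in full; the proofs are below) =====
def Claim_equal_flattening : Prop := ∀ (field : List (List Int)) (inventory : Int) (h_ : Int), Dom_flattening field inventory h_ → Spec_flattening field inventory h_ (flattening field inventory h_)

-- ===== LEMMAS AND PROOFS =====

-- per-cell cost of A's inner branches
def pvCost (h_ f : Int) : Int := if f > h_ then 2 * (f - h_) else if f < h_ then h_ - f else 0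

-- A's inner fold over one row of cells
lemma pvA_row (h_ : Int) (xs : List Int) : ∀ (t b : Int),
    xs.foldl (pvStepA h_) (t, b)
      = (t + (xs.map (pvCost h_)).sum, b + (xs.map (fun f => f - h_)).sum) := by
  induction xs with
  | nil => simp
  | cons x xs ih =>
    intro t b
    by_cases hx : x > h_
    · simp only [List.foldl_cons, List.map_cons, List.sum_cons, pvStepA, if_pos hx,
        if_neg (by omega : ¬ x < h_), ih, pvCost, Prod.mk.injEq]
      constructor <;> ring
    · by_cases hx2 : x < h_
      · simp only [List.foldl_cons, List.map_cons, List.sum_cons, pvStepA, if_neg hx,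
          if_pos hx2, ih, pvCost, Prod.mk.injEq]
        constructor <;> ring
      · simp only [List.foldl_cons, List.map_cons, List.sum_cons, pvStepA, if_neg hx,
          if_neg hx2, ih, pvCost, Prod.mk.injEq]
        constructor <;> omega

-- A's outer fold over the field, expressed through the flattened cell list
lemma pvA_field (h_ : Int) (field : List (List Int)) : ∀ (t b : Int),
    field.foldl (fun s row =>
        (PySem.List.pyRange 0 (row.length : Int) 1).foldl (fun s m =>
          pvStepA h_ s (PySem.List.pyGetD row m 0)) s) (t, b)
      = (t + (field.flatten.map (pvCost h_)).sum,
         b + (field.flatten.map (fun f => f - h_)).sum) := by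
  induction field with
  | nil => simp
  | cons row rest ih =>
    intro t b
    rw [List.foldl_cons,
      PySem.List.foldl_pyRange_zero_pyGetD' (f := pvStepA h_), pvA_row, ih,
      List.flatten_cons, List.map_append, List.map_append, List.sum_append,
      List.sum_append, Prod.mk.injEq]
    constructor <;> ring

-- B's histogram-building fold over one row
lemma pvB_row (xs : List Int) : ∀ (d : PySem.Dict Int Int) (x c : Int),
    xs.foldl (fun st v =>
        (st.1.insert v (st.1.getD v 0 + 1), st.2.1 + v, st.2.2 + 1)) (d, x, c)
      = (xs.foldl (fun d v => d.insert v (d.getD v 0 + 1)) d,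
         x + xs.sum, c + xs.length) := by
  induction xs with
  | nil => simp
  | cons v xs ih =>
    intro d x c
    simp only [List.foldl_cons, ih, List.sum_cons, List.length_cons, Prod.mk.injEq]
    and_intros <;> first | trivial | (push_cast; ring)

-- B's outer fold over the field, expressed through the flattened cell list
lemma pvB_field (field : List (List Int)) : ∀ (d : PySem.Dict Int Int) (x c : Int),
    field.foldl (fun st row =>
        row.foldl (fun st v =>
          (st.1.insert v (st.1.getD v 0 + 1), st.2.1 + v, st.2.2 + 1)) st) (d, x, c)
      = (field.flatten.foldl (fun d v => d.insert v (d.getD v 0 + 1)) d,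
         x + field.flatten.sum, c + field.flatten.length) := by
  induction field with
  | nil => simp
  | cons row rest ih =>
    intro d x c
    simp only [List.foldl_cons, pvB_row, ih, List.flatten_cons, List.sum_append,
      List.length_append, List.foldl_append, Prod.mk.injEq]
    and_intros <;> first | trivial | (push_cast; ring)

-- B's time loop over the histogram's items
lemma pvB_time (h_ : Int) (ps : List (Int × Int)) : ∀ (t : Int),
    ps.foldl (fun t p =>
        if p.1 > h_ then t + 2 * (p.1 - h_) * p.2
        else if p.1 < h_ then t + (h_ - p.1) * p.2
        else t) t
      = t + (ps.map (fun p => pvCost h_ p.1 * p.2)).sum := by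
  induction ps with
  | nil => simp
  | cons p ps ih =>
    intro t
    have hhead : (if p.1 > h_ then t + 2 * (p.1 - h_) * p.2
        else if p.1 < h_ then t + (h_ - p.1) * p.2 else t)
        = t + pvCost h_ p.1 * p.2 := by
      simp only [pvCost]; split_ifs <;> ring
    rw [List.foldl_cons, hhead, ih, List.map_cons, List.sum_cons]
    ring

-- an indicator sum over a Nodup list picks out one term
lemma pvIndicator (g : Int → Int) (x : Int) : ∀ (ks : List Int), ks.Nodup → x ∈ ks →
    (ks.map (fun k => g k * (if x = k then 1 else 0))).sum = g x := by
  intro ks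
  induction ks with
  | nil => simp
  | cons k ks ih =>
    intro hnd hmem
    simp only [List.map_cons, List.sum_cons]
    rcases List.mem_cons.mp hmem with h | h
    · subst h
      rw [if_pos rfl]
      have : ∀ j ∈ ks, g j * (if x = j then 1 else 0) = 0 := by
        intro j hj
        rw [if_neg (by rintro rfl; exact (List.nodup_cons.mp hnd).1 hj), mul_zero]
      rw [List.sum_eq_zero (by simpa using this)]
      ring
    · rw [if_neg (by rintro rfl; exact (List.nodup_cons.mp hnd).1 h), mul_zero,
        ih (List.nodup_cons.mp hnd).2 h]
      ring

-- summing g(k)·count(k) over any Nodup cover of xs's elements = summing g over xs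
lemma pvCountSum (g : Int → Int) (ks : List Int) (hnd : ks.Nodup) :
    ∀ (xs : List Int), (∀ x ∈ xs, x ∈ ks) →
    (ks.map (fun k => g k * (xs.count k : Int))).sum = (xs.map g).sum := by
  intro xs
  induction xs with
  | nil => simp
  | cons x xs ih =>
    intro hcov
    have hx : x ∈ ks := hcov x List.mem_cons_self
    have hxs : ∀ y ∈ xs, y ∈ ks := fun y hy => hcov y (List.mem_cons_of_mem _ hy)
    have hsplit : ∀ k : Int, ((x :: xs).count k : Int)
        = (xs.count k : Int) + (if x = k then 1 else 0) := by
      intro k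
      rw [List.count_cons]
      by_cases h : x = k
      · simp [h]
      · simp [h]
    calc (ks.map (fun k => g k * ((x :: xs).count k : Int))).sum
        = (ks.map (fun k => g k * (xs.count k : Int)
            + g k * (if x = k then 1 else 0))).sum := by
          apply congrArg; apply List.map_congr_left; intro k _
          rw [hsplit k]; ring
      _ = (ks.map (fun k => g k * (xs.count k : Int))).sum
            + (ks.map (fun k => g k * (if x = k then 1 else 0))).sum := by
          rw [← List.sum_map_add]
      _ = (xs.map g).sum + g x := by rw [ih hxs, pvIndicator g x ks hnd hx]
      _ = ((x :: xs).map g).sum := by simp [add_comm]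

-- map (· - h) sums to sum - h·length
lemma pvSubSum (h_ : Int) : ∀ (xs : List Int),
    (xs.map (fun f => f - h_)).sum = xs.sum - h_ * xs.length := by
  intro xs
  induction xs with
  | nil => simp
  | cons x xs ih => simp [ih]; ring

-- ===== VERDICT (by name: the statement is the Claim_ definition above) =====
theorem flattening_spec : Claim_equal_flattening := by
  intro field inventory h_ _
  unfold Spec_flattening
  simp only [flattening, flattening_alt]
  rw [PySem.List.foldl_pyRange_zero_pyGetD'
      (f := fun s row => (PySem.List.pyRange 0 ((row : List Int).length : Int) 1).foldl
        (fun s m => pvStepA h_ s (PySem.List.pyGetD row m 0)) s)]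
  rw [pvA_field, pvB_field, pvB_time]
  rw [PySem.Dict.foldl_insert_getD_add_one_eq_counter, PySem.Dict.items_counter,
    List.map_map]
  have hkey := pvCountSum (pvCost h_) (PySem.Set.ofList field.flatten)
    (PySem.Set.nodup_ofList _) field.flatten
    (fun x hx => (PySem.Set.mem_ofList _ _).mpr hx)
  simp only [Function.comp_def]
  rw [hkey, pvSubSum]
  simp only [zero_add]
  rw [show inventory + (field.flatten.sum - h_ * (field.flatten.length : Int))
      = inventory + field.flatten.sum - h_ * (field.flatten.length : Int) from by ring]
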